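-- pv_equiv track=rewrite | github.com/nathan-miller23/bRawL | architectures/utils.py | _separate_config
-- ===== SOURCE A (Python) =====
-- def _separate_config(model_config):
--     cnn_config, linear_config, split_config = [], [], []
--     layer_type = "conv"
--
--     for layer_config in model_config:
--         layer_name = layer_config["name"].lower()
--         if "conv" in layer_name:
--             assert layer_type == "conv", "Conv layer configuration cannot be parsed correctly"
--             cnn_config.append(layer_config)
--         elif "linear" in layer_name:
--             assert layer_type in ["conv", "linear"], "Linear layer configuration cannot be parsed correctly"
--             layer_type = "linear"
--             linear_config.append(layer_config)
--         elif "split" in layer_name: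
--             assert layer_type in ["conv", "linear", "split"], "Split layer configuration cannot be parsed correctly"
--             layer_type = "split"
--             split_config.append(layer_config)
--         else:
--             "Model layer cannot be parsed correctly"
--     return cnn_config, linear_config, split_config
-- ===== SOURCE B (Python) =====
-- def _phase(layer_name):
--     name = layer_name.lower()
--     if "conv" in name:
--         return 0
--     if "linear" in name:
--         return 1
--     if "split" in name:
--         return 2
--     return None
--
-- _MSGS = {0: "Conv layer configuration cannot be parsed correctly",
--          1: "Linear layer configuration cannot be parsed correctly",
--          2: "Split layer configuration cannot be parsed correctly"}
--
-- def _separate_config(model_config):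
--     phases = [_phase(layer_config["name"]) for layer_config in model_config]
--     hi = 0
--     for p in phases:
--         if p is not None:
--             assert hi <= p, _MSGS[p]
--             hi = p
--     return ([c for c, p in zip(model_config, phases) if p == 0],
--             [c for c, p in zip(model_config, phases) if p == 1],
--             [c for c, p in zip(model_config, phases) if p == 2])
-- ===== Notes on version B (the rewrite author's own statement) =====
-- stated objective: simpler
-- what changed: Replaces A's single stateful loop (layer_type string + per-branch appends) by a phase classification per layer (conv=0, linear=1, split=2, other=skipped), one monotonicity check over the phase list, and three zip-filter comprehensions building the triple.
import Mathlib
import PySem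

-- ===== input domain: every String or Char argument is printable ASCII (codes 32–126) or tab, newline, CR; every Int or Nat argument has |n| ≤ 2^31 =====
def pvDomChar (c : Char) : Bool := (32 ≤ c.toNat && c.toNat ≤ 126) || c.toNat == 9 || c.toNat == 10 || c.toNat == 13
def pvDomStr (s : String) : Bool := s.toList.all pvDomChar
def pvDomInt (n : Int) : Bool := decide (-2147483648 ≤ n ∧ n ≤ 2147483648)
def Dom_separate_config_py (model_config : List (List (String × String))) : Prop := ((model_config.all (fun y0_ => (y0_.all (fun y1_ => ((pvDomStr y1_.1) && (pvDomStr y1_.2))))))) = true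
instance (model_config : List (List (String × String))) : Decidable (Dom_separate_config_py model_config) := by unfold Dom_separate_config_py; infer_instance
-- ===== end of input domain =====

-- B replaces A's single stateful loop by a phase classification (conv→0, linear→1, split→2, other→skip),
-- one ordering check over the phase list, and three zip-filter comprehensions; objective: simpler decomposition, no speed claim.

-- ===== PORT A =====
-- A's loop: state = layer_type string; raising (KeyError on a missing "name", AssertionError
-- on an out-of-order layer) is modelled by `none`, excluded by Pre_ below.
def pvALoop : List (List (String × String)) → String →
    Option ((List (List (String × String))) × (List (List (String × String))) × (List (List (String × String))))
  | [], _ => some ([], [], [])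
  | c :: rest, lt =>
    match PySem.Dict.get? (PySem.Dict.mk c) "name" with
    | none => none
    | some nm =>
      let ln := PySem.Str.lower nm
      if PySem.Str.isIn "conv" ln then
        if lt == "conv" then (pvALoop rest lt).map (fun t => (c :: t.1, t.2.1, t.2.2)) else none
      else if PySem.Str.isIn "linear" ln then
        if lt == "conv" || lt == "linear" then
          (pvALoop rest "linear").map (fun t => (t.1, c :: t.2.1, t.2.2))
        else none
      else if PySem.Str.isIn "split" ln then
        if lt == "conv" || lt == "linear" || lt == "split" then
          (pvALoop rest "split").map (fun t => (t.1, t.2.1, c :: t.2.2))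
        else none
      else pvALoop rest lt

def separate_config_py (model_config : List (List (String × String))) : (List (List (String × String))) × (List (List (String × String))) × (List (List (String × String))) :=
  (pvALoop model_config "conv").getD ([], [], [])

-- ===== PORT B =====
-- Source B's _phase; the KeyError of c["name"] is modelled with getD "" (no layer word occurs in ""),
-- it is excluded by Pre_ anyway.
def pvPhase? (c : List (String × String)) : Option Int :=
  let n := PySem.Str.lower (PySem.Dict.getD (PySem.Dict.mk c) "name" "")
  if PySem.Str.isIn "conv" n then some 0
  else if PySem.Str.isIn "linear" n then some 1
  else if PySem.Str.isIn "split" n then some 2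
  else none

-- Source B's validation loop over `phases` only raises (AssertionError) and never changes the returned
-- value; the inputs on which it fires are outside Pre_, so it has no value-level counterpart here.
def separate_config_py_alt (model_config : List (List (String × String))) : (List (List (String × String))) × (List (List (String × String))) × (List (List (String × String))) :=
  let phases := model_config.map pvPhase?
  let zipped := model_config.zip phases
  (zipped.filterMap (fun cp => if cp.2 == some 0 then some cp.1 else none),
   zipped.filterMap (fun cp => if cp.2 == some 1 then some cp.1 else none),
   zipped.filterMap (fun cp => if cp.2 == some 2 then some cp.1 else none))

-- ===== PRECONDITION & SPEC =====
-- Pre_ excludes exactly the inputs on which A raises: a layer dict without a "name" key (KeyError)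
-- and layer sequences whose classified phases ever decrease (AssertionError).
def Pre_separate_config_py (model_config : List (List (String × String))) : Prop :=
  (∀ c ∈ model_config, (PySem.Dict.get? (PySem.Dict.mk c) "name").isSome) ∧
  List.IsChain (· ≤ ·) (0 :: model_config.filterMap pvPhase?)
instance (model_config : List (List (String × String))) : Decidable (Pre_separate_config_py model_config) := by unfold Pre_separate_config_py; infer_instance

def pvWitness_separate_config_py : (List (List (String × String))) :=
  [[("name", "Conv1")], [("name", "my_linear"), ("k", "v")], [("name", "relu")], [("name", "split_out")]]

def Spec_separate_config_py (model_config : List (List (String × String))) (out : (List (List (String × String))) × (List (List (String × String))) × (List (List (String × String)))) : Prop := out = separate_config_py_alt model_config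
instance (model_config : List (List (String × String))) (out : (List (List (String × String))) × (List (List (String × String))) × (List (List (String × String)))) : Decidable (Spec_separate_config_py model_config out) := by unfold Spec_separate_config_py; infer_instance

-- ===== CLAIM (what is proved, stated in full; the proofs are below) =====
def Claim_equal_separate_config_py : Prop := ∀ (model_config : List (List (String × String))), Dom_separate_config_py model_config → Pre_separate_config_py model_config → Spec_separate_config_py model_config (separate_config_py model_config)

-- ===== LEMMAS AND PROOFS =====

-- A's layer_type string corresponding to the running maximal phase
def pvLtOf (hi : Int) : String := if hi = 0 then "conv" else if hi = 1 then "linear" else "split"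

-- filtering directly by phase
def pvFilt (p : Int) (mc : List (List (String × String))) : List (List (String × String)) :=
  mc.filterMap (fun c => if pvPhase? c == some p then some c else none)

lemma pvZipFilt (p : Int) (mc : List (List (String × String))) :
    (mc.zip (mc.map pvPhase?)).filterMap (fun cp => if cp.2 == some p then some cp.1 else none)
      = pvFilt p mc := by
  induction mc with
  | nil => rfl
  | cons c rest ih => simp [pvFilt, List.filterMap_cons] at *; split <;> simp [ih]

lemma pvALoop_eq (mc : List (List (String × String))) :
    ∀ (hi : Int), (hi = 0 ∨ hi = 1 ∨ hi = 2) →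
    (∀ c ∈ mc, (PySem.Dict.get? (PySem.Dict.mk c) "name").isSome) →
    List.IsChain (· ≤ ·) (hi :: mc.filterMap pvPhase?) →
    pvALoop mc (pvLtOf hi) = some (pvFilt 0 mc, pvFilt 1 mc, pvFilt 2 mc) := by
  induction mc with
  | nil => intro hi _ _ _; rfl
  | cons c rest ih =>
    intro hi h012 hnames hch
    obtain ⟨nm, hnm⟩ := Option.isSome_iff_exists.mp (hnames c (by simp))
    have hrest : ∀ c' ∈ rest, (PySem.Dict.get? (PySem.Dict.mk c') "name").isSome :=
      fun c' hc' => hnames c' (by simp [hc'])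
    have hgetD : PySem.Dict.getD (PySem.Dict.mk c) "name" "" = nm := by
      rw [PySem.Dict.getD_eq_get?_getD, hnm]; rfl
    by_cases h0 : PySem.Str.isIn "conv" (PySem.Str.lower nm) = true
    · have hph : pvPhase? c = some 0 := by
        simp only [pvPhase?]; rw [hgetD, if_pos h0]
      have hch' : hi ≤ 0 ∧ List.IsChain (· ≤ ·) (0 :: rest.filterMap pvPhase?) := by
        rw [List.filterMap_cons, hph] at hch; exact List.isChain_cons_cons.mp hch
      have hhi : hi = 0 := by omega
      subst hhi
      have hrec := ih 0 (by omega) hrest hch'.2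
      rw [show pvLtOf 0 = "conv" from rfl] at hrec ⊢
      simp only [pvALoop, hnm]
      rw [if_pos h0, if_pos (show (("conv" : String) == "conv") = true from rfl), hrec]
      simp [pvFilt, hph]
    · by_cases h1 : PySem.Str.isIn "linear" (PySem.Str.lower nm) = true
      · have hph : pvPhase? c = some 1 := by
          simp only [pvPhase?]; rw [hgetD, if_neg h0, if_pos h1]
        have hch' : hi ≤ 1 ∧ List.IsChain (· ≤ ·) (1 :: rest.filterMap pvPhase?) := by
          rw [List.filterMap_cons, hph] at hch; exact List.isChain_cons_cons.mp hch
        have hcond : (pvLtOf hi == "conv" || pvLtOf hi == "linear") = true := by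
          have := hch'.1
          rcases h012 with h | h | h <;> subst h <;> first | rfl | omega
        have hrec := ih 1 (by omega) hrest hch'.2
        rw [show pvLtOf 1 = "linear" from rfl] at hrec
        simp only [pvALoop, hnm]
        rw [if_neg h0, if_pos h1, if_pos hcond, hrec]
        simp [pvFilt, hph]
      · by_cases h2 : PySem.Str.isIn "split" (PySem.Str.lower nm) = true
        · have hph : pvPhase? c = some 2 := by
            simp only [pvPhase?]; rw [hgetD, if_neg h0, if_neg h1, if_pos h2]
          have hch' : hi ≤ 2 ∧ List.IsChain (· ≤ ·) (2 :: rest.filterMap pvPhase?) := by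
            rw [List.filterMap_cons, hph] at hch; exact List.isChain_cons_cons.mp hch
          have hcond : (pvLtOf hi == "conv" || pvLtOf hi == "linear" || pvLtOf hi == "split") = true := by
            rcases h012 with h | h | h <;> subst h <;> rfl
          have hrec := ih 2 (by omega) hrest hch'.2
          rw [show pvLtOf 2 = "split" from rfl] at hrec
          simp only [pvALoop, hnm]
          rw [if_neg h0, if_neg h1, if_pos h2, if_pos hcond, hrec]
          simp [pvFilt, hph]
        · have hph : pvPhase? c = none := by
            simp only [pvPhase?]; rw [hgetD, if_neg h0, if_neg h1, if_neg h2]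
          have hch' : List.IsChain (· ≤ ·) (hi :: rest.filterMap pvPhase?) := by
            rwa [List.filterMap_cons, hph] at hch
          have hrec := ih hi h012 hrest hch'
          simp only [pvALoop, hnm]
          rw [if_neg h0, if_neg h1, if_neg h2, hrec]
          simp [pvFilt, hph]

-- ===== VERDICT (by name: the statement is the Claim_ definition above) =====
theorem separate_config_py_spec : Claim_equal_separate_config_py := by
  intro mc _ hpre
  unfold Spec_separate_config_py separate_config_py separate_config_py_alt
  rw [show ("conv" : String) = pvLtOf 0 from rfl, pvALoop_eq mc 0 (by omega) hpre.1 hpre.2,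
    Option.getD_some]
  show (pvFilt 0 mc, pvFilt 1 mc, pvFilt 2 mc)
      = ((mc.zip (mc.map pvPhase?)).filterMap (fun cp => if cp.2 == some 0 then some cp.1 else none),
         (mc.zip (mc.map pvPhase?)).filterMap (fun cp => if cp.2 == some 1 then some cp.1 else none),
         (mc.zip (mc.map pvPhase?)).filterMap (fun cp => if cp.2 == some 2 then some cp.1 else none))
  rw [pvZipFilt, pvZipFilt, pvZipFilt]
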